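-- pv_equiv track=rewrite | github.com/pigatron-industries/diffusers-playground | diffuserslib/functional/nodes/image/diffusers/TileSizeCalculatorNode.py | calcTileSize
-- ===== SOURCE A (Python) =====
-- def calcTileSize(total_length:int, max_tile_length:int, tile_overlap:int, restrict:str|None = None) -> int:
--     if restrict is not None and restrict == "even":
--         n = 2
--     else:
--         n = 1
--     while True:
--         tile_length = (total_length + (n - 1) * tile_overlap) // n
--         if tile_length <= max_tile_length:
--             tile_length = (tile_length + 7) // 8 * 8  # Round up to the nearest multiple of 8
--             return tile_length
--         n += 2 if restrict is not None else 1
-- ===== SOURCE B (Python) =====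
-- def calcTileSize(total_length: int, max_tile_length: int, tile_overlap: int, restrict: str | None = None) -> int:
--     # Closed form: the loop condition (total+(n-1)*ov)//n <= max is, for n>0,
--     # equivalent to total-ov < n*(max+1-ov); solve for the smallest n in the
--     # arithmetic progression (start, start+step, ...) instead of scanning.
--     start = 2 if restrict == "even" else 1
--     step = 2 if restrict is not None else 1
--     c = total_length - tile_overlap
--     d = max_tile_length + 1 - tile_overlap
--     if d > 0:
--         n0 = c // d + 1          # smallest integer n with n*d > c
--         if n0 <= start:
--             n = start
--         else:
--             n = start + -(-(n0 - start) // step) * step  # round up into the progression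
--     else:
--         n = start  # d <= 0: only n = start can satisfy the condition (Pre_)
--     tile_length = (total_length + (n - 1) * tile_overlap) // n
--     return (tile_length + 7) // 8 * 8
-- ===== Notes on version B (the rewrite author's own statement) =====
-- stated objective: alternative
-- what changed: B replaces A's linear scan over candidate division counts n by solving the loop inequality (total+(n-1)*overlap)//n <= max in closed form (smallest n with total-overlap < n*(max+1-overlap), rounded up into the arithmetic progression start, start+step, ...), then applies the same round-to-8.
import Mathlib
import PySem

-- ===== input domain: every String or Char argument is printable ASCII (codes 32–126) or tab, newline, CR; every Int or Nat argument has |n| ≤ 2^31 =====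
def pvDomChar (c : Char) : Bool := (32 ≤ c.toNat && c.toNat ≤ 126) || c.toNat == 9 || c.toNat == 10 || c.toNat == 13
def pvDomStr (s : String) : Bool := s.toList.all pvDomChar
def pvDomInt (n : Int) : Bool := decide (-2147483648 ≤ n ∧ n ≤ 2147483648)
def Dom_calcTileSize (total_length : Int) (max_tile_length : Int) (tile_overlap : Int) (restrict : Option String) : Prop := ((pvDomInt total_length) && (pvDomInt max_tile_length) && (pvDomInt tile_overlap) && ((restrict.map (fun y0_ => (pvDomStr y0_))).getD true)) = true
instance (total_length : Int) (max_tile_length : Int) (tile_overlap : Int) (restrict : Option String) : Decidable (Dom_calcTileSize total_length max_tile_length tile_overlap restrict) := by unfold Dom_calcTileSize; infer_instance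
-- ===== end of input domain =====

-- B replaces A's linear scan over division counts by a closed-form solution of the
-- loop inequality; Pre_ excludes exactly the inputs where A loops forever.


-- ===== PORT A =====
-- A's `while True` loop; the Nat fuel only makes it total in Lean (0 returned on
-- exhaustion); on Dom ∧ Pre_ the loop returns well within the given fuel.
def calcLoopA (total_length tile_overlap max_tile_length inc : Int) : Nat → Int → Int
  | 0, _ => 0
  | fuel + 1, n =>
    let tile_length := PySem.Int.floordiv (total_length + (n - 1) * tile_overlap) n
    if tile_length ≤ max_tile_length then
      PySem.Int.floordiv (tile_length + 7) 8 * 8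
    else
      calcLoopA total_length tile_overlap max_tile_length inc fuel (n + inc)

def calcTileSize (total_length : Int) (max_tile_length : Int) (tile_overlap : Int) (restrict : Option String) : Int :=
  let n : Int := if restrict.isSome ∧ restrict = some "even" then 2 else 1
  let inc : Int := if restrict.isSome then 2 else 1
  calcLoopA total_length tile_overlap max_tile_length inc 17179869184 n

-- ===== PORT B =====
def calcTileSize_alt (total_length : Int) (max_tile_length : Int) (tile_overlap : Int) (restrict : Option String) : Int :=
  let start : Int := if restrict = some "even" then 2 else 1
  let step : Int := if restrict.isSome then 2 else 1
  let c := total_length - tile_overlap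
  let d := max_tile_length + 1 - tile_overlap
  let n : Int :=
    if 0 < d then
      let n0 := PySem.Int.floordiv c d + 1
      if n0 ≤ start then start
      else start + -(PySem.Int.floordiv (-(n0 - start)) step) * step
    else start
  let tile_length := PySem.Int.floordiv (total_length + (n - 1) * tile_overlap) n
  PySem.Int.floordiv (tile_length + 7) 8 * 8

-- ===== PRECONDITION & SPEC =====
-- Pre_ excludes exactly the inputs on which A's while-loop never returns
-- (tile length can never drop to max_tile_length, e.g. tile_overlap > max_tile_length).
def Pre_calcTileSize (total_length : Int) (max_tile_length : Int) (tile_overlap : Int) (restrict : Option String) : Prop :=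
  0 < max_tile_length + 1 - tile_overlap ∨
    total_length - tile_overlap <
      (if restrict = some "even" then (2:Int) else 1) * (max_tile_length + 1 - tile_overlap)
instance (total_length : Int) (max_tile_length : Int) (tile_overlap : Int) (restrict : Option String) : Decidable (Pre_calcTileSize total_length max_tile_length tile_overlap restrict) := by unfold Pre_calcTileSize; infer_instance

def pvWitness_calcTileSize : Int × Int × Int × Option String := (1024, 512, 64, some "even")

def Spec_calcTileSize (total_length : Int) (max_tile_length : Int) (tile_overlap : Int) (restrict : Option String) (out : Int) : Prop := out = calcTileSize_alt total_length max_tile_length tile_overlap restrict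
instance (total_length : Int) (max_tile_length : Int) (tile_overlap : Int) (restrict : Option String) (out : Int) : Decidable (Spec_calcTileSize total_length max_tile_length tile_overlap restrict out) := by unfold Spec_calcTileSize; infer_instance

-- ===== CLAIM (what is proved, stated in full; the proofs are below) =====
def Claim_equal_calcTileSize : Prop := ∀ (total_length : Int) (max_tile_length : Int) (tile_overlap : Int) (restrict : Option String), Dom_calcTileSize total_length max_tile_length tile_overlap restrict → Pre_calcTileSize total_length max_tile_length tile_overlap restrict → Spec_calcTileSize total_length max_tile_length tile_overlap restrict (calcTileSize total_length max_tile_length tile_overlap restrict)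

-- ===== LEMMAS AND PROOFS =====

-- The loop condition in closed form: for n > 0,
-- (total + (n-1)*ov) // n ≤ max  ↔  total - ov < n * (max + 1 - ov).
lemma cond_iff (total ov maxl n : Int) (hn : 0 < n) :
    PySem.Int.floordiv (total + (n - 1) * ov) n ≤ maxl ↔
      total - ov < n * (maxl + 1 - ov) := by
  have h : PySem.Int.floordiv (total + (n - 1) * ov) n ≤ maxl ↔
      PySem.Int.floordiv (total + (n - 1) * ov) n < maxl + 1 := by omega
  rw [h, PySem.Int.floordiv_lt_iff_lt_mul hn]
  have key : n * (maxl + 1 - ov) - (total - ov) =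
      (maxl + 1) * n - (total + (n - 1) * ov) := by ring
  constructor <;> intro h2 <;> linarith

-- Running A's loop from n reaches the first qualifying index N of the progression.
lemma loopA_run (total ov maxl inc : Int)
    (N : Int)
    (hcN : PySem.Int.floordiv (total + (N - 1) * ov) N ≤ maxl)
    (hmin : ∀ m : Int, 0 < m → m < N → inc ∣ (N - m) →
      ¬ PySem.Int.floordiv (total + (m - 1) * ov) m ≤ maxl)
    (hinc : 0 < inc) :
    ∀ (fuel : Nat) (n : Int), 0 < n → n ≤ N → inc ∣ (N - n) → N - n < (fuel : Int) →
      calcLoopA total ov maxl inc fuel n =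
        PySem.Int.floordiv (PySem.Int.floordiv (total + (N - 1) * ov) N + 7) 8 * 8 := by
  intro fuel
  induction fuel with
  | zero => intro n _ hle _ hf; exfalso; simp at hf; omega
  | succ k ih =>
    intro n hn hle hdvd hf
    by_cases hc : PySem.Int.floordiv (total + (n - 1) * ov) n ≤ maxl
    · have hne : n = N := by
        rcases lt_or_eq_of_le hle with hlt | he
        · exact absurd hc (hmin n hn hlt hdvd)
        · exact he
      subst hne
      simp [calcLoopA, hc]
    · have hlt : n < N := by
        rcases lt_or_eq_of_le hle with hlt | he
        · exact hlt
        · subst he; exact absurd hcN hc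
      have hge : inc ≤ N - n := Int.le_of_dvd (by omega) hdvd
      have hstep : calcLoopA total ov maxl inc (k + 1) n =
          calcLoopA total ov maxl inc k (n + inc) := by
        simp [calcLoopA, hc]
      rw [hstep]
      refine ih (n + inc) (by omega) (by omega) ?_ ?_
      · rcases hdvd with ⟨k2, hk2⟩
        refine ⟨k2 - 1, ?_⟩
        have e : inc * (k2 - 1) = inc * k2 - inc := by ring
        linarith
      · push_cast at hf ⊢; omega

-- Shared core: for any admissible (start, inc), A's loop equals B's closed form
-- evaluated at the index N that B computes.
lemma main_core (total maxl ov start inc : Int)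
    (hsi : (start = 1 ∧ inc = 1) ∨ (start = 1 ∧ inc = 2) ∨ (start = 2 ∧ inc = 2))
    (hpre : 0 < maxl + 1 - ov ∨ total - ov < start * (maxl + 1 - ov))
    (hdom : -2147483648 ≤ total ∧ total ≤ 2147483648 ∧ -2147483648 ≤ ov ∧ ov ≤ 2147483648)
    (N : Int)
    (hN : N = if 0 < maxl + 1 - ov then
        (if PySem.Int.floordiv (total - ov) (maxl + 1 - ov) + 1 ≤ start then start
         else start + -(PySem.Int.floordiv
            (-(PySem.Int.floordiv (total - ov) (maxl + 1 - ov) + 1 - start)) inc) * inc)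
      else start) :
    calcLoopA total ov maxl inc 17179869184 start =
      PySem.Int.floordiv (PySem.Int.floordiv (total + (N - 1) * ov) N + 7) 8 * 8 := by
  have hstart : 0 < start := by rcases hsi with ⟨h1,_⟩|⟨h1,_⟩|⟨h1,_⟩ <;> omega
  have hinc : 0 < inc := by rcases hsi with ⟨_,h1⟩|⟨_,h1⟩|⟨_,h1⟩ <;> omega
  have hinc2 : inc ≤ 2 := by rcases hsi with ⟨_,h1⟩|⟨_,h1⟩|⟨_,h1⟩ <;> omega
  have hNfacts : start ≤ N ∧ inc ∣ (N - start) ∧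
      (0 < maxl + 1 - ov → PySem.Int.floordiv (total - ov) (maxl + 1 - ov) < N) ∧
      (0 < maxl + 1 - ov → ∀ m : Int, 0 < m → m < N → inc ∣ (N - m) →
        m ≤ PySem.Int.floordiv (total - ov) (maxl + 1 - ov)) ∧
      N ≤ start + 17179869183 := by
    by_cases hdp : 0 < maxl + 1 - ov
    · have hfd_ub : PySem.Int.floordiv (total - ov) (maxl + 1 - ov) ≤ 4294967296 := by
        by_contra hcon
        have h1 : (4294967297 : Int) ≤ PySem.Int.floordiv (total - ov) (maxl + 1 - ov) := by
          omega
        have h2 : (4294967297 : Int) * (maxl + 1 - ov) ≤ total - ov :=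
          (PySem.Int.le_floordiv_iff_mul_le hdp).mp h1
        have h3 : (4294967297 : Int) * 1 ≤ 4294967297 * (maxl + 1 - ov) :=
          mul_le_mul_of_nonneg_left (by omega) (by norm_num)
        linarith [hdom.1, hdom.2.1, hdom.2.2.1, hdom.2.2.2]
      by_cases h0 : PySem.Int.floordiv (total - ov) (maxl + 1 - ov) + 1 ≤ start
      · have hNe : N = start := by rw [hN, if_pos hdp, if_pos h0]
        refine ⟨by omega, by simp [hNe], by omega, ?_, by omega⟩
        intro _ m hm hmN hdvdm
        rw [hNe] at hmN hdvdm
        rcases hsi with ⟨h1,h2⟩|⟨h1,h2⟩|⟨h1,h2⟩ <;> subst h1 <;> subst h2 <;> omega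
      · rw [if_pos hdp, if_neg h0] at hN
        have hqiff := (PySem.Int.neg_floordiv_neg_eq_iff_of_pos
          (a := PySem.Int.floordiv (total - ov) (maxl + 1 - ov) + 1 - start) (b := inc)
          (q := -(PySem.Int.floordiv
            (-(PySem.Int.floordiv (total - ov) (maxl + 1 - ov) + 1 - start)) inc))
          hinc).mp rfl
        set q : Int := -(PySem.Int.floordiv
          (-(PySem.Int.floordiv (total - ov) (maxl + 1 - ov) + 1 - start)) inc) with hq
        set F : Int := PySem.Int.floordiv (total - ov) (maxl + 1 - ov) with hF
        have hql : (q - 1) * inc ≤ F - start := by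
          have h1 := Int.lt_iff_add_one_le.mp hqiff.1
          linarith
        have hqu : F + 1 - start ≤ q * inc := hqiff.2
        have hexp : (q - 1) * inc = q * inc - inc := by ring
        refine ⟨by linarith, ⟨q, by rw [hN]; ring⟩, by intro _; linarith, ?_, by linarith⟩
        intro _ m hm hmN hdvdm
        have hge : inc ≤ N - m := Int.le_of_dvd (by omega) hdvdm
        linarith
    · have hNe : N = start := by rw [hN, if_neg hdp]
      refine ⟨by omega, by simp [hNe], by omega, by omega, by omega⟩
  obtain ⟨hNs, hNdvd, hNfd, hNmin, hNub⟩ := hNfacts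
  have hNpos : 0 < N := by omega
  have hcN : PySem.Int.floordiv (total + (N - 1) * ov) N ≤ maxl := by
    rw [cond_iff total ov maxl N hNpos]
    by_cases hdp : 0 < maxl + 1 - ov
    · have h1 : ¬ (N ≤ PySem.Int.floordiv (total - ov) (maxl + 1 - ov)) := by
        have := hNfd hdp; omega
      have h2 : ¬ (N * (maxl + 1 - ov) ≤ total - ov) := fun hcon =>
        h1 ((PySem.Int.le_floordiv_iff_mul_le hdp).mpr hcon)
      exact not_le.mp h2
    · have hNe : N = start := by rw [hN, if_neg hdp]
      rcases hpre with h | h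
      · exact absurd h hdp
      · rw [hNe]; exact h
  have hmin : ∀ m : Int, 0 < m → m < N → inc ∣ (N - m) →
      ¬ PySem.Int.floordiv (total + (m - 1) * ov) m ≤ maxl := by
    intro m hm hmN hdvdm
    rw [cond_iff total ov maxl m hm]
    by_cases hdp : 0 < maxl + 1 - ov
    · have hmle := hNmin hdp m hm hmN hdvdm
      have := (PySem.Int.le_floordiv_iff_mul_le hdp).mp hmle
      exact not_lt.mpr this
    · exfalso
      have hNe : N = start := by rw [hN, if_neg hdp]
      rw [hNe] at hmN hdvdm
      rcases hsi with ⟨h1,h2⟩|⟨h1,h2⟩|⟨h1,h2⟩ <;> subst h1 <;> subst h2 <;> omega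
  exact loopA_run total ov maxl inc N hcN hmin hinc 17179869184 start hstart hNs hNdvd
    (by push_cast; omega)

-- ===== VERDICT (by name: the statement is the Claim_ definition above) =====
theorem calcTileSize_spec : Claim_equal_calcTileSize := by
  intro total maxl ov restrict hdom hpre
  unfold Spec_calcTileSize calcTileSize calcTileSize_alt
  have hdom' : -2147483648 ≤ total ∧ total ≤ 2147483648 ∧
      -2147483648 ≤ ov ∧ ov ≤ 2147483648 := by
    unfold Dom_calcTileSize pvDomInt at hdom
    simp only [Bool.and_eq_true, decide_eq_true_eq] at hdom
    exact ⟨hdom.1.1.1.1, hdom.1.1.1.2, hdom.1.2.1, hdom.1.2.2⟩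
  unfold Pre_calcTileSize at hpre
  by_cases he : restrict = some "even"
  · subst he
    simpa using main_core total maxl ov 2 2 (by right; right; exact ⟨rfl, rfl⟩)
      (by simpa using hpre) hdom' _ rfl
  · cases restrict with
    | none =>
      simpa using main_core total maxl ov 1 1 (by left; exact ⟨rfl, rfl⟩)
        (by simpa using hpre) hdom' _ rfl
    | some s =>
      simpa [he] using main_core total maxl ov 1 2 (by right; left; exact ⟨rfl, rfl⟩)
        (by simpa [he] using hpre) hdom' _ rfl
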